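-- pv_equiv track=rewrite | github.com/saagpatel/GPT_RAG | src/gpt_rag/chunking.py | _trimmed_match_span
-- ===== SOURCE A (Python) =====
-- def _trimmed_match_span(text: str, start: int, end: int) -> tuple[int, int] | None:
--     while start < end and text[start].isspace():
--         start += 1
--     while end > start and text[end - 1].isspace():
--         end -= 1
--     if start >= end:
--         return None
--     return start, end
-- ===== SOURCE B (Python) =====
-- def _trimmed_match_span(text: str, start: int, end: int) -> tuple[int, int] | None:
--     span = text[start:end]
--     new_start = start + (len(span) - len(span.lstrip()))
--     new_end = end - (len(span) - len(span.rstrip()))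
--     if new_start >= new_end:
--         return None
--     return new_start, new_end
-- ===== Notes on version B (the rewrite author's own statement) =====
-- stated objective: simpler
-- what changed: Replaces A's two index-advancing while loops over text with one slice plus argument-free lstrip/rstrip length arithmetic on the span.
-- outside the precondition, e.g. on _trimmed_match_span('  a  ', -1, 5): A returns (2, 3), B returns (0, 4); on _trimmed_match_span('ab', 1, 4): A raises IndexError, B returns (1, 4)
import Mathlib
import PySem

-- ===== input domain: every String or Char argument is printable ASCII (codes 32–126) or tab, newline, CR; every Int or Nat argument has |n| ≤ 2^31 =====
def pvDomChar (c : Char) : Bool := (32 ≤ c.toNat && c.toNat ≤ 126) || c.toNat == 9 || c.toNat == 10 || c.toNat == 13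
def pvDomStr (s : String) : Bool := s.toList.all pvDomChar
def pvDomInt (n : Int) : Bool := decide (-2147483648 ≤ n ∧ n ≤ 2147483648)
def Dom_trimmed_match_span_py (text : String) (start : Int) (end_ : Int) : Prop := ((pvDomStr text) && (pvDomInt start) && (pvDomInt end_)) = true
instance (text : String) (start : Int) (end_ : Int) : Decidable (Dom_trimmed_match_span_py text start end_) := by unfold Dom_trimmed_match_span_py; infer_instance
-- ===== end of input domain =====

-- B replaces A's two index-advancing while loops by one slice plus lstrip/rstrip length
-- arithmetic (objective: simpler). Equivalence is about the return value; neither mutates.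

-- ===== PORT A =====
-- first while loop: advance `start` over whitespace
def trimLoop1 (text : String) (end_ : Int) (start : Int) : Int :=
  if _h : start < end_ then
    match PySem.Str.pyGet? text start with
    | some c => if PySem.Chars.isspace c then trimLoop1 text end_ (start + 1) else start
    | none => start   -- text[start] would raise IndexError in Python; excluded by Pre_
  else start
termination_by (end_ - start).toNat
decreasing_by omega

-- second while loop: retreat `end` over whitespace
def trimLoop2 (text : String) (start : Int) (end_ : Int) : Int :=
  if _h : end_ > start then
    match PySem.Str.pyGet? text (end_ - 1) with
    | some c => if PySem.Chars.isspace c then trimLoop2 text start (end_ - 1) else end_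
    | none => end_    -- text[end-1] would raise IndexError in Python; excluded by Pre_
  else end_
termination_by (end_ - start).toNat
decreasing_by omega

def trimmed_match_span_py (text : String) (start : Int) (end_ : Int) : Option (Int × Int) :=
  let start' := trimLoop1 text end_ start
  let end' := trimLoop2 text start' end_
  if start' ≥ end' then none else some (start', end')

-- ===== PORT B =====
def trimmed_match_span_py_alt (text : String) (start : Int) (end_ : Int) : Option (Int × Int) :=
  let span := PySem.Str.slice text (some start) (some end_)
  let new_start := start + (PySem.Str.len span - PySem.Str.len (PySem.Str.lstrip span))
  let new_end := end_ - (PySem.Str.len span - PySem.Str.len (PySem.Str.rstrip span))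
  if new_start ≥ new_end then none else some (new_start, new_end)

-- ===== PRECONDITION & SPEC =====
-- Pre_ restricts a non-empty span (start < end) to the natural in-range domain 0 ≤ start,
-- end ≤ len(text): outside it A either raises IndexError or indexes through Python's
-- negative-index wraparound, which is not the span semantics this function is for.
def Pre_trimmed_match_span_py (text : String) (start : Int) (end_ : Int) : Prop :=
  start < end_ → (0 ≤ start ∧ end_ ≤ (text.toList.length : Int))
instance (text : String) (start : Int) (end_ : Int) : Decidable (Pre_trimmed_match_span_py text start end_) := by unfold Pre_trimmed_match_span_py; infer_instance

def pvWitness_trimmed_match_span_py : String × Int × Int := ("  a ", 0, 4)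

def Spec_trimmed_match_span_py (text : String) (start : Int) (end_ : Int) (out : Option (Int × Int)) : Prop := out = trimmed_match_span_py_alt text start end_
instance (text : String) (start : Int) (end_ : Int) (out : Option (Int × Int)) : Decidable (Spec_trimmed_match_span_py text start end_ out) := by unfold Spec_trimmed_match_span_py; infer_instance

-- ===== CLAIM (what is proved, stated in full; the proofs are below) =====
def Claim_equal_trimmed_match_span_py : Prop := ∀ (text : String) (start : Int) (end_ : Int), Dom_trimmed_match_span_py text start end_ → Pre_trimmed_match_span_py text start end_ → Spec_trimmed_match_span_py text start end_ (trimmed_match_span_py text start end_)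

-- ===== LEMMAS AND PROOFS =====

lemma takeWhile_length_lt_of_exists {p : Char → Bool} {l : List Char}
    (h : ∃ x ∈ l, p x = false) : (l.takeWhile p).length < l.length := by
  induction l with
  | nil => simp at h
  | cons a t ih =>
    obtain ⟨x, hx, hpx⟩ := h
    by_cases hpa : p a
    · simp only [List.takeWhile_cons, hpa, if_true, List.length_cons]
      have : ∃ x ∈ t, p x = false := by
        rcases List.mem_cons.mp hx with rfl | hxt
        · exact absurd hpa (by simp [hpx])
        · exact ⟨x, hxt, hpx⟩
      simpa using ih this
    · simp [List.takeWhile_cons, hpa]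

lemma exists_mem_dropWhile_of_exists {p : Char → Bool} {l : List Char}
    (h : ∃ x ∈ l, p x = false) : ∃ x ∈ l.dropWhile p, p x = false := by
  induction l with
  | nil => simp at h
  | cons a t ih =>
    obtain ⟨x, hx, hpx⟩ := h
    by_cases hpa : p a
    · have : ∃ x ∈ t, p x = false := by
        rcases List.mem_cons.mp hx with rfl | hxt
        · exact absurd hpa (by simp [hpx])
        · exact ⟨x, hxt, hpx⟩
      simpa [List.dropWhile_cons, hpa] using ih this
    · exact ⟨a, by simp [List.dropWhile_cons, hpa], by simpa using hpa⟩

lemma drop_length_takeWhile {p : Char → Bool} (l : List Char) :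
    l.drop (l.takeWhile p).length = l.dropWhile p := by
  induction l with
  | nil => simp
  | cons a t ih =>
    by_cases hpa : p a
    · simpa [List.takeWhile_cons, List.dropWhile_cons, hpa] using ih
    · simp [List.takeWhile_cons, List.dropWhile_cons, hpa]

lemma loop1_eq (text : String) (a b : Nat) (hab : a ≤ b) (hb : b ≤ text.toList.length) :
    trimLoop1 text (b : Int) (a : Int) =
      (a : Int) + ((((text.toList.drop a).take (b - a)).takeWhile PySem.Chars.isspace).length : Int) := by
  generalize hfuel : b - a = n
  induction n generalizing a with
  | zero =>
    have : a = b := by omega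
    subst this
    rw [trimLoop1]
    simp
  | succ n ih =>
    have hlt : a < b := by omega
    have hal : a < text.toList.length := by omega
    rw [trimLoop1]
    rw [dif_pos (by exact_mod_cast hlt)]
    have hget : PySem.Str.pyGet? text (a : Int) = some (text.toList[a]) := by
      simp [PySem.Str.pyGet?_natCast, List.getElem?_eq_getElem hal]
    have hdrop : text.toList.drop a = text.toList[a] :: text.toList.drop (a + 1) :=
      List.drop_eq_getElem_cons hal
    have htake : (text.toList.drop a).take (b - a) =
        text.toList[a] :: (text.toList.drop (a + 1)).take (b - (a + 1)) := by
      rw [hdrop]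
      have : b - a = (b - (a + 1)) + 1 := by omega
      rw [this, List.take_succ_cons]
    rw [hfuel] at htake
    have hfn : b - (a + 1) = n := by omega
    rw [hfn] at htake
    by_cases hsp : PySem.Chars.isspace text.toList[a]
    · simp only [hget, hsp, if_true]
      have := ih (a + 1) (by omega) (by omega)
      rw [htake]
      simp only [List.takeWhile_cons, hsp, if_true, List.length_cons]
      push_cast at this ⊢
      rw [this]
      ring
    · simp only [hget, hsp, if_false]
      rw [htake]
      simp [List.takeWhile_cons, hsp]

lemma loop2_eq (text : String) (s b : Nat) (hsb : s ≤ b) (hb : b ≤ text.toList.length)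
    (hex : ∃ c ∈ (text.toList.drop s).take (b - s), PySem.Chars.isspace c = false) :
    trimLoop2 text (s : Int) (b : Int) =
      (b : Int) - ((((text.toList.drop s).take (b - s)).reverse.takeWhile PySem.Chars.isspace).length : Int) := by
  generalize hfuel : b - s = n
  induction n generalizing b with
  | zero =>
    have : s = b := by omega
    subst this
    simp at hex
  | succ n ih =>
    have hlt : s < b := by omega
    have hbl : b - 1 < text.toList.length := by omega
    rw [trimLoop2]
    rw [dif_pos (by exact_mod_cast hlt)]
    have hcast : (b : Int) - 1 = ((b - 1 : Nat) : Int) := by omega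
    have hget : PySem.Str.pyGet? text ((b : Int) - 1) = some (text.toList[b - 1]) := by
      rw [hcast]
      simp [PySem.Str.pyGet?_natCast, List.getElem?_eq_getElem hbl]
    have hidx : s + n < text.toList.length := by omega
    have hsn : (text.toList.drop s)[n]? = some (text.toList[b - 1]) := by
      rw [List.getElem?_drop]
      have : s + n = b - 1 := by omega
      rw [this, List.getElem?_eq_getElem hbl]
    have htake : (text.toList.drop s).take (b - s) =
        (text.toList.drop s).take n ++ [text.toList[b - 1]] := by
      rw [hfuel, List.take_succ, hsn]
      rfl
    have hrev : ((text.toList.drop s).take (b - s)).reverse =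
        text.toList[b - 1] :: ((text.toList.drop s).take n).reverse := by
      rw [htake, List.reverse_append]
      rfl
    rw [hfuel] at hrev
    by_cases hsp : PySem.Chars.isspace text.toList[b - 1]
    · simp only [hget, hsp, if_true]
      have hex' : ∃ c ∈ (text.toList.drop s).take (b - 1 - s), PySem.Chars.isspace c = false := by
        obtain ⟨c, hc, hpc⟩ := hex
        rw [htake, List.mem_append] at hc
        rcases hc with hc | hc
        · exact ⟨c, by rwa [show b - 1 - s = n by omega], hpc⟩
        · simp at hc; subst hc; rw [hsp] at hpc; cases hpc
      have := ih (b - 1) (by omega) (by omega) hex' (by omega)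
      rw [hcast, this, hrev]
      simp only [List.takeWhile_cons, hsp, if_true, List.length_cons]
      push_cast
      omega
    · simp only [hget, hsp, if_false]
      rw [hrev]
      simp [List.takeWhile_cons, hsp]

-- ===== VERDICT (by name: the statement is the Claim_ definition above) =====
lemma lstrip_toList (s : String) :
    (PySem.Str.lstrip s).toList = s.toList.dropWhile PySem.Chars.isspace := by
  rw [PySem.Str.toList_lstrip]; rfl

lemma rstrip_toList (s : String) :
    (PySem.Str.rstrip s).toList = (s.toList.reverse.dropWhile PySem.Chars.isspace).reverse := by
  rw [PySem.Str.toList_rstrip]; rfl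

theorem trimmed_match_span_py_spec : Claim_equal_trimmed_match_span_py := by
  intro text start end_ _hdom hpre
  unfold Spec_trimmed_match_span_py
  simp only [trimmed_match_span_py, trimmed_match_span_py_alt]
  have hd1 : 0 ≤ PySem.Str.len (PySem.Str.slice text (some start) (some end_))
      - PySem.Str.len (PySem.Str.lstrip (PySem.Str.slice text (some start) (some end_))) := by
    rw [PySem.Str.len_eq, PySem.Str.len_eq, lstrip_toList]
    have := List.length_dropWhile_le PySem.Chars.isspace (PySem.Str.slice text (some start) (some end_)).toList
    omega
  have hd2 : 0 ≤ PySem.Str.len (PySem.Str.slice text (some start) (some end_))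
      - PySem.Str.len (PySem.Str.rstrip (PySem.Str.slice text (some start) (some end_))) := by
    rw [PySem.Str.len_eq, PySem.Str.len_eq, rstrip_toList]
    have := List.length_dropWhile_le PySem.Chars.isspace (PySem.Str.slice text (some start) (some end_)).toList.reverse
    simp only [List.length_reverse] at this ⊢
    omega
  by_cases hse : start < end_
  case neg =>
    have hL1 : trimLoop1 text end_ start = start := by rw [trimLoop1, dif_neg hse]
    have hL2 : trimLoop2 text start end_ = end_ := by rw [trimLoop2, dif_neg (by omega)]
    rw [hL1, hL2, if_pos (by omega), if_pos (by omega)]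
  case pos =>
    obtain ⟨h0, hle⟩ := hpre hse
    have h0e : 0 ≤ end_ := by omega
    lift start to ℕ using h0 with a
    lift end_ to ℕ using h0e with b
    have hab : a < b := by exact_mod_cast hse
    have hbl : b ≤ text.toList.length := by exact_mod_cast hle
    set p := PySem.Chars.isspace with hp
    set sp := (text.toList.drop a).take (b - a) with hspdef
    have hspan : (PySem.Str.slice text (some (a : Int)) (some (b : Int))).toList = sp := by
      rw [PySem.Str.toList_slice, PySem.Chars.slice_eq_listSlice, PySem.List.slice_natCast]
    have hn : sp.length = b - a := by
      rw [hspdef, List.length_take, List.length_drop]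
      omega
    have hk1le : (sp.takeWhile p).length ≤ sp.length := (List.takeWhile_prefix p).length_le
    have hdropw : (sp.dropWhile p).length = sp.length - (sp.takeWhile p).length := by
      have := congrArg List.length (List.takeWhile_append_dropWhile (p := p) (l := sp))
      simp only [List.length_append] at this
      omega
    have hloop1 := loop1_eq text a b (by omega) hbl
    simp only [← hp, ← hspdef] at hloop1
    have hlenspan : PySem.Str.len (PySem.Str.slice text (some (a:Int)) (some (b:Int))) = (sp.length : Int) := by
      rw [PySem.Str.len_eq, hspan]
    have hlenls : PySem.Str.len (PySem.Str.lstrip (PySem.Str.slice text (some (a:Int)) (some (b:Int))))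
        = ((sp.dropWhile p).length : Int) := by
      rw [PySem.Str.len_eq, lstrip_toList, hspan]
    have hlenrs : PySem.Str.len (PySem.Str.rstrip (PySem.Str.slice text (some (a:Int)) (some (b:Int))))
        = ((sp.length : Int) - ((sp.reverse.takeWhile p).length : Int)) := by
      rw [PySem.Str.len_eq, rstrip_toList, hspan]
      simp only [← hp]
      have := congrArg List.length (List.takeWhile_append_dropWhile (p := p) (l := sp.reverse))
      simp only [List.length_append, List.length_reverse] at this ⊢
      omega
    by_cases hex : ∃ c ∈ sp, p c = false
    · -- span has a non-space character: both return some (start + k1, end - k2)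
      set k1 := (sp.takeWhile p).length with hk1
      have hk1lt : k1 < sp.length := takeWhile_length_lt_of_exists hex
      have hspan' : (text.toList.drop (a + k1)).take (b - (a + k1)) = sp.dropWhile p := by
        have h1 : sp.drop k1 = sp.dropWhile p := drop_length_takeWhile sp
        rw [← h1, hspdef, List.drop_take, List.drop_drop]
        congr 1
        omega
      have hex' : ∃ c ∈ sp.dropWhile p, p c = false := exists_mem_dropWhile_of_exists hex
      have hexr : ∃ c ∈ (sp.dropWhile p).reverse, p c = false := by
        obtain ⟨c, hc, hpc⟩ := hex'
        exact ⟨c, List.mem_reverse.mpr hc, hpc⟩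
      set k2 := ((sp.dropWhile p).reverse.takeWhile p).length with hk2
      have hk2lt : k2 < (sp.dropWhile p).length := by
        have := takeWhile_length_lt_of_exists hexr
        simpa using this
      have hk2eq : sp.reverse.takeWhile p = (sp.dropWhile p).reverse.takeWhile p := by
        have hsplit : sp.reverse = (sp.dropWhile p).reverse ++ (sp.takeWhile p).reverse := by
          rw [← List.reverse_append, List.takeWhile_append_dropWhile]
        rw [hsplit, List.takeWhile_append,
          if_neg (by simp only [List.length_reverse]; exact Nat.ne_of_lt hk2lt)]
      have hA1 : trimLoop1 text (b : Int) (a : Int) = (a : Int) + (k1 : Int) := hloop1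
      have hcastak : (a : Int) + (k1 : Int) = ((a + k1 : Nat) : Int) := by push_cast; ring
      have hA2 : trimLoop2 text ((a : Int) + (k1 : Int)) (b : Int) = (b : Int) - (k2 : Int) := by
        rw [hcastak]
        have := loop2_eq text (a + k1) b (by omega) hbl (hspan' ▸ hex')
        rw [hspan', ← hk2] at this
        exact this
      have hB1 : PySem.Str.len (PySem.Str.slice text (some (a:Int)) (some (b:Int)))
          - PySem.Str.len (PySem.Str.lstrip (PySem.Str.slice text (some (a:Int)) (some (b:Int))))
          = (k1 : Int) := by
        rw [hlenspan, hlenls, hdropw]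
        push_cast [Nat.cast_sub hk1le]
        ring
      have hB2 : PySem.Str.len (PySem.Str.slice text (some (a:Int)) (some (b:Int)))
          - PySem.Str.len (PySem.Str.rstrip (PySem.Str.slice text (some (a:Int)) (some (b:Int))))
          = (k2 : Int) := by
        rw [hlenspan, hlenrs, hk2eq, ← hk2]
        ring
      rw [hA1, hA2, hB1, hB2, if_neg (by omega)]
    · -- span is all whitespace: both return none
      push_neg at hex
      have hall : sp.takeWhile p = sp := by
        rw [List.takeWhile_eq_self_iff]
        intro x hx
        simpa using hex x hx
      have hnil : sp.dropWhile p = [] := by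
        rw [List.dropWhile_eq_nil_iff]
        intro x hx
        simpa using hex x hx
      have hA1 : trimLoop1 text (b : Int) (a : Int) = (b : Int) := by
        rw [hloop1, hall, hn]
        omega
      have hL2 : trimLoop2 text (b : Int) (b : Int) = (b : Int) := by
        rw [trimLoop2, dif_neg (by omega)]
      have hB1 : PySem.Str.len (PySem.Str.lstrip (PySem.Str.slice text (some (a:Int)) (some (b:Int)))) = 0 := by
        rw [hlenls, hnil]
        simp
      rw [hA1, hL2, if_pos (by omega), if_pos (by
        rw [hlenspan, hB1, hlenrs]
        have : (sp.reverse.takeWhile p).length ≤ sp.length := by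
          have := (List.takeWhile_prefix (l := sp.reverse) p).length_le
          simpa using this
        omega)]
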